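-- pv_equiv track=rewrite | github.com/Lorenzo-274/Thesis_Appendix | Multi_agent_script_final.py | group_themes
-- ===== SOURCE A (Python) =====
-- def group_themes(extracted_facts):
--     """
--     Assigns extracted facts to one macro-theme based on keyword matching.
--     Each fact is assigned to the first matching category only (no duplicates across groups).
--     """
--
--     themes = {
--         "Strategic Rationale and Synergies": ["synergies", "strategy", "expansion", "growth", "alignment", "position", "leader"],
--         "Financial Terms and Payment Method": ["cash", "shares", "payment", "value"],
--         "Premium and Valuation": ["premium", "valuation", "price"],
--         "Integration and Risks": ["integration", "culture", "execution", "challenge"],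
--         "Regulatory Aspects": ["regulatory", "antitrust", "approval"],
--         "Finance and Leverage": ["leverage", "debt", "financing"],
--         "Ownership Structure Post-Deal" : ["ownership","structure", "shareholders", "hold", "capital"],
--         "Timeline and Conditions": ["apporoval", "conditions", "restrictions", ]
--     }
--
--     assigned_facts = set()
--     grouped = {}
--
--     for theme, keywords in themes.items():
--         grouped[theme] = []
--         for fact in extracted_facts:
--             if fact in assigned_facts:
--                 continue  # skip if already assigned to another theme
--             if any(keyword in fact.lower() for keyword in keywords):
--                 grouped[theme].append(fact)
--                 assigned_facts.add(fact)
--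
--     # Return only non-empty theme groups
--     return {k: v for k, v in grouped.items() if v}
-- ===== SOURCE B (Python) =====
-- # Different decomposition: a flat keyword->theme table, one tagging pass over the
-- # facts (dedupe + classify by first matching keyword), then group by theme order.
--
-- _KEYWORD_THEME = [
--     ("synergies", "Strategic Rationale and Synergies"),
--     ("strategy", "Strategic Rationale and Synergies"),
--     ("expansion", "Strategic Rationale and Synergies"),
--     ("growth", "Strategic Rationale and Synergies"),
--     ("alignment", "Strategic Rationale and Synergies"),
--     ("position", "Strategic Rationale and Synergies"),
--     ("leader", "Strategic Rationale and Synergies"),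
--     ("cash", "Financial Terms and Payment Method"),
--     ("shares", "Financial Terms and Payment Method"),
--     ("payment", "Financial Terms and Payment Method"),
--     ("value", "Financial Terms and Payment Method"),
--     ("premium", "Premium and Valuation"),
--     ("valuation", "Premium and Valuation"),
--     ("price", "Premium and Valuation"),
--     ("integration", "Integration and Risks"),
--     ("culture", "Integration and Risks"),
--     ("execution", "Integration and Risks"),
--     ("challenge", "Integration and Risks"),
--     ("regulatory", "Regulatory Aspects"),
--     ("antitrust", "Regulatory Aspects"),
--     ("approval", "Regulatory Aspects"),
--     ("leverage", "Finance and Leverage"),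
--     ("debt", "Finance and Leverage"),
--     ("financing", "Finance and Leverage"),
--     ("ownership", "Ownership Structure Post-Deal"),
--     ("structure", "Ownership Structure Post-Deal"),
--     ("shareholders", "Ownership Structure Post-Deal"),
--     ("hold", "Ownership Structure Post-Deal"),
--     ("capital", "Ownership Structure Post-Deal"),
--     ("apporoval", "Timeline and Conditions"),
--     ("conditions", "Timeline and Conditions"),
--     ("restrictions", "Timeline and Conditions"),
-- ]
--
-- _THEME_ORDER = [
--     "Strategic Rationale and Synergies",
--     "Financial Terms and Payment Method",
--     "Premium and Valuation",
--     "Integration and Risks",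
--     "Regulatory Aspects",
--     "Finance and Leverage",
--     "Ownership Structure Post-Deal",
--     "Timeline and Conditions",
-- ]
--
--
-- def group_themes(extracted_facts):
--     seen = set()
--     tagged = []  # (theme, fact) pairs, one per distinct classifiable fact
--     for fact in extracted_facts:
--         if fact not in seen:
--             seen.add(fact)
--             low = fact.lower()
--             for kw, theme in _KEYWORD_THEME:
--                 if kw in low:
--                     tagged.append((theme, fact))
--                     break
--     return {t: [f for th, f in tagged if th == t]
--             for t in _THEME_ORDER
--             if any(th == t for th, _ in tagged)}
-- ===== Notes on version B (the rewrite author's own statement) =====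
-- stated objective: faster
-- what changed: Replaces A's theme-outer/fact-inner nested loops with a mutable assigned-set by a flat keyword->theme lookup table plus a single tagging pass over the facts (each distinct fact is classified once, breaking at its first matching keyword; duplicates and already-classified facts are never keyword-tested again), followed by a grouping comprehension over the fixed theme order; A instead rescans and keyword-tests the whole fact list once per theme.
import Mathlib
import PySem

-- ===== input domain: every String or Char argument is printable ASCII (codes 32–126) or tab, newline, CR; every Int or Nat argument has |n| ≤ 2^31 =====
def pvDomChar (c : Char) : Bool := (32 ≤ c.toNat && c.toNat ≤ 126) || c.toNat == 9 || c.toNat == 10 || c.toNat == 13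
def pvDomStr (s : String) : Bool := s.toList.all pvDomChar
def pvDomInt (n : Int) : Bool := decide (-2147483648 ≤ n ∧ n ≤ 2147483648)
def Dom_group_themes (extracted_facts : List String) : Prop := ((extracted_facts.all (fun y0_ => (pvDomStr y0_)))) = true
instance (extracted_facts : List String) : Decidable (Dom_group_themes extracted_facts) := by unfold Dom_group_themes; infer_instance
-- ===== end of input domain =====

-- B replaces A's theme-outer/fact-inner nested loops and assigned-set by a flat
-- keyword->theme table, one tagging pass over the facts (dedupe + classify by first
-- matching keyword), then a grouping comprehension over the fixed theme order
-- (objective: faster — each distinct fact is keyword-tested once instead of once per theme).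

-- ===== PORT A =====
def pvThemesA : PySem.Dict String (List String) := PySem.Dict.mk [
  ("Strategic Rationale and Synergies", ["synergies", "strategy", "expansion", "growth", "alignment", "position", "leader"]),
  ("Financial Terms and Payment Method", ["cash", "shares", "payment", "value"]),
  ("Premium and Valuation", ["premium", "valuation", "price"]),
  ("Integration and Risks", ["integration", "culture", "execution", "challenge"]),
  ("Regulatory Aspects", ["regulatory", "antitrust", "approval"]),
  ("Finance and Leverage", ["leverage", "debt", "financing"]),
  ("Ownership Structure Post-Deal", ["ownership", "structure", "shareholders", "hold", "capital"]),
  ("Timeline and Conditions", ["apporoval", "conditions", "restrictions"])]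

def group_themes (extracted_facts : List String) : List (String × List String) :=
  let res := pvThemesA.items.foldl
    (fun (st : PySem.Set String × PySem.Dict String (List String)) tk =>
      extracted_facts.foldl
        (fun st2 fact =>
          if PySem.Set.contains st2.1 fact then st2
          else if tk.2.any (fun keyword => PySem.Str.isIn keyword (PySem.Str.lower fact)) then
            (PySem.Set.add st2.1 fact, st2.2.modify tk.1 [] (fun l => l ++ [fact]))
          else st2)
        (st.1, st.2.insert tk.1 []))
    (PySem.Set.empty, PySem.Dict.empty)
  res.2.items.filter (fun kv => !kv.2.isEmpty)

-- ===== PORT B =====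
def pvKwTheme : List (String × String) := [
  ("synergies", "Strategic Rationale and Synergies"),
  ("strategy", "Strategic Rationale and Synergies"),
  ("expansion", "Strategic Rationale and Synergies"),
  ("growth", "Strategic Rationale and Synergies"),
  ("alignment", "Strategic Rationale and Synergies"),
  ("position", "Strategic Rationale and Synergies"),
  ("leader", "Strategic Rationale and Synergies"),
  ("cash", "Financial Terms and Payment Method"),
  ("shares", "Financial Terms and Payment Method"),
  ("payment", "Financial Terms and Payment Method"),
  ("value", "Financial Terms and Payment Method"),
  ("premium", "Premium and Valuation"),
  ("valuation", "Premium and Valuation"),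
  ("price", "Premium and Valuation"),
  ("integration", "Integration and Risks"),
  ("culture", "Integration and Risks"),
  ("execution", "Integration and Risks"),
  ("challenge", "Integration and Risks"),
  ("regulatory", "Regulatory Aspects"),
  ("antitrust", "Regulatory Aspects"),
  ("approval", "Regulatory Aspects"),
  ("leverage", "Finance and Leverage"),
  ("debt", "Finance and Leverage"),
  ("financing", "Finance and Leverage"),
  ("ownership", "Ownership Structure Post-Deal"),
  ("structure", "Ownership Structure Post-Deal"),
  ("shareholders", "Ownership Structure Post-Deal"),
  ("hold", "Ownership Structure Post-Deal"),
  ("capital", "Ownership Structure Post-Deal"),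
  ("apporoval", "Timeline and Conditions"),
  ("conditions", "Timeline and Conditions"),
  ("restrictions", "Timeline and Conditions")]

def pvThemeOrder : List String := [
  "Strategic Rationale and Synergies",
  "Financial Terms and Payment Method",
  "Premium and Valuation",
  "Integration and Risks",
  "Regulatory Aspects",
  "Finance and Leverage",
  "Ownership Structure Post-Deal",
  "Timeline and Conditions"]

def group_themes_alt (extracted_facts : List String) : List (String × List String) :=
  let st := extracted_facts.foldl
    (fun (st : PySem.Set String × List (String × String)) fact =>
      if PySem.Set.contains st.1 fact then st
      else
        let seen := PySem.Set.add st.1 fact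
        let low := PySem.Str.lower fact
        match pvKwTheme.find? (fun kt => PySem.Str.isIn kt.1 low) with
        | some kt => (seen, st.2 ++ [(kt.2, fact)])
        | none => (seen, st.2))
    (PySem.Set.empty, [])
  (pvThemeOrder.filter (fun t => st.2.any (fun p => p.1 == t))).map
    (fun t => (t, (st.2.filter (fun p => p.1 == t)).map (fun p => p.2)))

-- ===== PRECONDITION & SPEC =====
def Spec_group_themes (extracted_facts : List String) (out : List (String × List String)) : Prop := out = group_themes_alt extracted_facts
instance (extracted_facts : List String) (out : List (String × List String)) : Decidable (Spec_group_themes extracted_facts out) := by unfold Spec_group_themes; infer_instance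

-- ===== CLAIM (what is proved, stated in full; the proofs are below) =====
def Claim_equal_group_themes : Prop := ∀ (extracted_facts : List String), Dom_group_themes extracted_facts → Spec_group_themes extracted_facts (group_themes extracted_facts)

-- ===== LEMMAS AND PROOFS =====

-- A's theme table as a plain association list (used only by the proofs)
def pvThemesL : List (String × List String) := [
  ("Strategic Rationale and Synergies", ["synergies", "strategy", "expansion", "growth", "alignment", "position", "leader"]),
  ("Financial Terms and Payment Method", ["cash", "shares", "payment", "value"]),
  ("Premium and Valuation", ["premium", "valuation", "price"]),
  ("Integration and Risks", ["integration", "culture", "execution", "challenge"]),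
  ("Regulatory Aspects", ["regulatory", "antitrust", "approval"]),
  ("Finance and Leverage", ["leverage", "debt", "financing"]),
  ("Ownership Structure Post-Deal", ["ownership", "structure", "shareholders", "hold", "capital"]),
  ("Timeline and Conditions", ["apporoval", "conditions", "restrictions"])]

-- keyword match: some keyword occurs in fact.lower()
def pvMk (kws : List String) (f : String) : Bool :=
  kws.any (fun keyword => PySem.Str.isIn keyword (PySem.Str.lower f))

-- the facts A's inner loop (keywords kws) appends, given the already-assigned set s
def pvPick (s : List String) (kws : List String) : List String → List String
  | [] => []
  | f :: fs =>
    if f ∈ s then pvPick s kws fs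
    else if pvMk kws f then f :: pvPick (s ++ [f]) kws fs
    else pvPick s kws fs

-- the per-theme lists A's outer loop produces, threading the assigned set
def pvCanonA (facts : List String) : List String → List (String × List String) → List (String × List String)
  | _, [] => []
  | s, p :: ts => (p.1, pvPick s p.2 facts) :: pvCanonA facts (s ++ pvPick s p.2 facts) ts

-- the same lists, with the assigned set replaced by shrinking the fact pool
def pvCommon : List String → List (String × List String) → List (String × List String)
  | _, [] => []
  | fs, p :: ts => (p.1, fs.filter (pvMk p.2)) :: pvCommon (fs.filter (fun f => !pvMk p.2 f)) ts

-- B's classifier: the theme of the first matching keyword in the flat table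
def pvFlat (f : String) : Option String :=
  (pvKwTheme.find? (fun kt => PySem.Str.isIn kt.1 (PySem.Str.lower f))).map Prod.snd

-- the (theme, fact) pairs B's tagging pass appends, given the already-seen set s
def pvTag (s : List String) : List String → List (String × String)
  | [] => []
  | f :: fs =>
    if f ∈ s then pvTag s fs
    else (match pvFlat f with | some t => [(t, f)] | none => []) ++ pvTag (s ++ [f]) fs

-- A's inner loop over the facts, started at (s, base.insert t acc), appends pvPick
theorem pv_inner (t : String) (kws : List String) :
    ∀ (facts : List String) (s : PySem.Set String) (base : PySem.Dict String (List String)) (acc : List String),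
      base.contains t = false →
      facts.foldl
        (fun st2 fact =>
          if PySem.Set.contains st2.1 fact then st2
          else if kws.any (fun keyword => PySem.Str.isIn keyword (PySem.Str.lower fact)) then
            (PySem.Set.add st2.1 fact, st2.2.modify t [] (fun l => l ++ [fact]))
          else st2)
        (s, base.insert t acc)
      = (s ++ pvPick s kws facts, base.insert t (acc ++ pvPick s kws facts)) := by
  intro facts
  induction facts with
  | nil => intro s base acc _; simp [pvPick]
  | cons f fs ih =>
    intro s base acc hb
    simp only [List.foldl_cons]
    by_cases h1 : f ∈ s
    · have hc : PySem.Set.contains s f = true := by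
        simp [PySem.Set.contains_eq_listContains, h1]
      simp only [hc, if_pos]
      rw [ih s base acc hb]
      simp [pvPick, h1]
    · have hc : PySem.Set.contains s f = false := by
        simp [PySem.Set.contains_eq_listContains, h1]
      simp only [hc, Bool.false_eq_true, if_false]
      by_cases h2 : pvMk kws f
      · have h2' : (kws.any (fun keyword => PySem.Str.isIn keyword (PySem.Str.lower f))) = true := h2
        have hadd : PySem.Set.add s f = s ++ [f] := PySem.Set.add_of_not_mem h1
        have hmod : ((base.insert t acc).modify t [] (fun l => l ++ [f])) = base.insert t (acc ++ [f]) := by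
          simp [PySem.Dict.modify, PySem.Dict.getD_insert_self, PySem.Dict.insert_insert_self]
        rw [if_pos h2', hadd, hmod, ih (s ++ [f]) base (acc ++ [f]) hb]
        simp [pvPick, h1, h2]
      · have h2' : (kws.any (fun keyword => PySem.Str.isIn keyword (PySem.Str.lower f))) = false := by
          simpa [pvMk] using h2
        rw [h2']
        simp only [Bool.false_eq_true, if_false]
        rw [ih s base acc hb]
        simp [pvPick, h1, h2]

-- A's outer loop over the themes: the dict's items are base.items ++ pvCanonA
theorem pv_outer (facts : List String) :
    ∀ (ts : List (String × List String)) (s : PySem.Set String) (base : PySem.Dict String (List String)),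
      (∀ p ∈ ts, base.contains p.1 = false) → (ts.map Prod.fst).Nodup →
      (ts.foldl
        (fun (st : PySem.Set String × PySem.Dict String (List String)) tk =>
          facts.foldl
            (fun st2 fact =>
              if PySem.Set.contains st2.1 fact then st2
              else if tk.2.any (fun keyword => PySem.Str.isIn keyword (PySem.Str.lower fact)) then
                (PySem.Set.add st2.1 fact, st2.2.modify tk.1 [] (fun l => l ++ [fact]))
              else st2)
            (st.1, st.2.insert tk.1 []))
        (s, base)).2.items = base.items ++ pvCanonA facts s ts := by
  intro ts
  induction ts with
  | nil => intro s base _ _; simp [pvCanonA]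
  | cons p ts ih =>
    intro s base hfresh hnodup
    have hb : base.contains p.1 = false := hfresh p (by simp)
    simp only [List.foldl_cons]
    rw [pv_inner p.1 p.2 facts s base [] hb]
    simp only [List.nil_append]
    rw [ih (s ++ pvPick s p.2 facts) (base.insert p.1 (pvPick s p.2 facts))
        (by
          intro q hq
          rw [PySem.Dict.contains_insert]
          have hne : q.1 ≠ p.1 := by
            have := hnodup
            simp only [List.map_cons, List.nodup_cons] at this
            intro h; exact this.1 (h ▸ List.mem_map_of_mem hq)
          simp [hne, hfresh q (by simp [hq])])
        (by simpa using hnodup.of_cons)]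
    rw [PySem.Dict.items_insert_of_not_contains base _ hb]
    simp [pvCanonA]

-- pvPick = filter the deduplicated facts: drop assigned, keep matching
theorem pv_pick_filter (kws : List String) :
    ∀ (facts s : List String),
      pvPick s kws facts
        = ((PySem.List.dedup facts).filter (fun f => !decide (f ∈ s))).filter (pvMk kws) := by
  intro facts
  induction facts with
  | nil => intro s; simp [pvPick, PySem.List.dedup]
  | cons f fs ih =>
    intro s
    rw [PySem.List.dedup_eq_ofList, PySem.Set.ofList_cons, ← PySem.List.dedup_eq_ofList]
    by_cases h1 : f ∈ s
    · simp only [pvPick, if_pos h1]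
      rw [ih s]
      congr 1
      rw [List.filter_cons_of_neg (by simp [h1])]
      simp only [PySem.Set.discard, List.filter_filter]
      apply List.filter_congr
      intro y _
      by_cases hy : y = f
      · subst hy; simp [h1]
      · simp [hy]
    · by_cases h2 : pvMk kws f
      · simp only [pvPick, if_neg h1, if_pos h2]
        rw [ih (s ++ [f])]
        rw [List.filter_cons_of_pos (p := fun a => !decide (a ∈ s)) (by simp [h1]),
            List.filter_cons_of_pos (by simpa [pvMk] using h2)]
        congr 1
        simp only [PySem.Set.discard, List.filter_filter]
        apply List.filter_congr
        intro y _
        by_cases hy : y = f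
        · subst hy; simp
        · have hbf : (y == f) = false := by simp [hy]
          simp [hbf, List.mem_append, hy]
      · simp only [pvPick, if_neg h1, if_neg h2]
        rw [ih s]
        rw [List.filter_cons_of_pos (p := fun a => !decide (a ∈ s)) (by simp [h1]),
            List.filter_cons_of_neg (by simpa [pvMk] using h2)]
        simp only [PySem.Set.discard, List.filter_filter]
        apply List.filter_congr
        intro y _
        by_cases hy : y = f
        · have h2' : pvMk kws y = false := by rw [hy]; simpa using h2
          simp [h2']
        · have hbf : (y == f) = false := by simp [hy]
          simp [hbf]

-- threading the assigned set = shrinking the deduplicated pool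
theorem pv_canonA_common (facts : List String) :
    ∀ (ts : List (String × List String)) (s : List String),
      pvCanonA facts s ts = pvCommon ((PySem.List.dedup facts).filter (fun f => !decide (f ∈ s))) ts := by
  intro ts
  induction ts with
  | nil => intro s; simp [pvCanonA, pvCommon]
  | cons p ts ih =>
    intro s
    obtain ⟨n, kws⟩ := p
    simp only [pvCanonA, pvCommon]
    congr 1
    · exact congrArg (Prod.mk n) (pv_pick_filter kws facts s)
    rw [ih (s ++ pvPick s kws facts)]
    congr 1
    rw [pv_pick_filter kws facts s, List.filter_filter, List.filter_filter]
    apply List.filter_congr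
    intro y hym
    by_cases hs : y ∈ s
    · simp [hs, List.mem_append]
    · by_cases hm : pvMk kws y
      · have hyf : y ∈ facts := by
          have := hym; rw [PySem.List.dedup_eq_ofList] at this
          exact (PySem.Set.mem_ofList _ _).mp this
        simp [hs, hm, List.mem_append, List.mem_filter, hyf]
      · simp [hs, hm, List.mem_append, List.mem_filter]

-- shrinking the pool = classifying by the first matching theme of the remaining list
theorem pv_common_first :
    ∀ (ts : List (String × List String)) (fs : List String), (ts.map Prod.fst).Nodup →
      pvCommon fs ts
        = ts.map (fun p => (p.1, fs.filter (fun f => ((ts.find? (fun q => pvMk q.2 f)).map (fun q => q.1)) == some p.1))) := by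
  intro ts
  induction ts with
  | nil => intro fs _; simp [pvCommon]
  | cons p ts ih =>
    intro fs hnd
    obtain ⟨n, kws⟩ := p
    have hnp : n ∉ ts.map Prod.fst := by
      simp only [List.map_cons, List.nodup_cons] at hnd; exact hnd.1
    have hnd' : (ts.map Prod.fst).Nodup := by
      simp only [List.map_cons, List.nodup_cons] at hnd; exact hnd.2
    simp only [pvCommon, List.map_cons]
    congr 1
    · refine congrArg (Prod.mk n) ?_
      apply List.filter_congr
      intro y _
      by_cases hm : pvMk kws y
      · rw [List.find?_cons_of_pos (by simpa using hm)]
        simp [hm]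
      · rw [List.find?_cons_of_neg (by simpa using hm)]
        have hm' : pvMk kws y = false := by simpa using hm
        rw [hm']
        cases hfind : ts.find? (fun q => pvMk q.2 y) with
        | none => simp
        | some q =>
          have hq : q ∈ ts := List.mem_of_find?_eq_some hfind
          have : q.1 ≠ n := by
            intro h; exact hnp (h ▸ List.mem_map_of_mem hq)
          simp [this]
    · rw [ih (fs.filter (fun f => !pvMk kws f)) hnd']
      apply List.map_congr_left
      intro q hq
      have hqn : q.1 ≠ n := by
        intro h; exact hnp (h ▸ List.mem_map_of_mem hq)
      refine Prod.ext rfl ?_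
      rw [List.filter_filter]
      apply List.filter_congr
      intro y _
      by_cases hm : pvMk kws y
      · rw [List.find?_cons_of_pos (by simpa using hm)]
        have hm' : pvMk kws y = true := hm
        simp [hm', (Ne.symm hqn : ¬ n = q.1)]
      · rw [List.find?_cons_of_neg (by simpa using hm)]
        have hm' : pvMk kws y = false := by simpa using hm
        simp [hm']

-- B's tagging fold: the seen set grows by Set.update, the tag list appends pvTag
theorem pv_b_fold :
    ∀ (facts : List String) (s : PySem.Set String) (acc : List (String × String)),
      facts.foldl
        (fun (st : PySem.Set String × List (String × String)) fact =>
          if PySem.Set.contains st.1 fact then st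
          else
            let seen := PySem.Set.add st.1 fact
            let low := PySem.Str.lower fact
            match pvKwTheme.find? (fun kt => PySem.Str.isIn kt.1 low) with
            | some kt => (seen, st.2 ++ [(kt.2, fact)])
            | none => (seen, st.2))
        (s, acc)
      = (PySem.Set.update s facts, acc ++ pvTag s facts) := by
  intro facts
  induction facts with
  | nil => intro s acc; simp [PySem.Set.update, pvTag]
  | cons f fs ih =>
    intro s acc
    simp only [List.foldl_cons]
    have hupd : PySem.Set.update s (f :: fs) = PySem.Set.update (PySem.Set.add s f) fs := rfl
    by_cases h1 : f ∈ s
    · have hc : PySem.Set.contains s f = true := by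
        simp [PySem.Set.contains_eq_listContains, h1]
      have hadd : PySem.Set.add s f = s := by
        simp [PySem.Set.add, h1]
      simp only [hc, if_pos]
      rw [ih s acc, hupd, hadd]
      have ht : pvTag s (f :: fs) = pvTag s fs := by simp [pvTag, h1]
      rw [ht]
    · have hc : PySem.Set.contains s f = false := by
        simp [PySem.Set.contains_eq_listContains, h1]
      simp only [hc, Bool.false_eq_true, if_false]
      cases hg : pvKwTheme.find? (fun kt => PySem.Str.isIn kt.1 (PySem.Str.lower f)) with
      | some kt =>
        have hf : pvFlat f = some kt.2 := by unfold pvFlat; rw [hg]; rfl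
        have ht : pvTag s (f :: fs) = (kt.2, f) :: pvTag (s ++ [f]) fs := by
          simp [pvTag, h1, hf]
        rw [ih (PySem.Set.add s f) (acc ++ [(kt.2, f)]), hupd,
            PySem.Set.add_of_not_mem h1, ht]
        simp
      | none =>
        have hf : pvFlat f = none := by unfold pvFlat; rw [hg]; rfl
        have ht : pvTag s (f :: fs) = pvTag (s ++ [f]) fs := by simp [pvTag, h1, hf]
        rw [ih (PySem.Set.add s f) acc, hupd, PySem.Set.add_of_not_mem h1, ht]

-- pvTag = classify the still-unseen deduplicated facts
theorem pv_tag_filter :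
    ∀ (facts s : List String),
      pvTag s facts
        = ((PySem.List.dedup facts).filter (fun f => !decide (f ∈ s))).filterMap
            (fun f => (pvFlat f).map (fun t => (t, f))) := by
  intro facts
  induction facts with
  | nil => intro s; simp [pvTag, PySem.List.dedup]
  | cons f fs ih =>
    intro s
    rw [PySem.List.dedup_eq_ofList, PySem.Set.ofList_cons, ← PySem.List.dedup_eq_ofList]
    by_cases h1 : f ∈ s
    · simp only [pvTag, if_pos h1]
      rw [ih s]
      rw [List.filter_cons_of_neg (by simp [h1])]
      congr 1
      simp only [PySem.Set.discard, List.filter_filter]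
      apply List.filter_congr
      intro y _
      by_cases hy : y = f
      · subst hy; simp [h1]
      · simp [hy]
    · simp only [pvTag, if_neg h1]
      rw [ih (s ++ [f])]
      rw [List.filter_cons_of_pos (p := fun a => !decide (a ∈ s)) (by simp [h1])]
      rw [List.filterMap_cons]
      have htail :
          ((PySem.List.dedup fs).filter (fun y => !decide (y ∈ s ++ [f])))
            = ((PySem.Set.discard (PySem.List.dedup fs) f).filter (fun y => !decide (y ∈ s))) := by
        simp only [PySem.Set.discard, List.filter_filter]
        apply List.filter_congr
        intro y _
        by_cases hy : y = f
        · subst hy; simp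
        · have hbf : (y == f) = false := by simp [hy]
          simp [hbf, List.mem_append, hy]
      rw [← htail]
      cases hf : pvFlat f with
      | some t => simp
      | none => simp

-- find? on the flattened (keyword, theme) table = find? on the theme table
theorem pv_find_flatMap (pred : String → Bool) :
    ∀ (ts : List (String × List String)),
      ((ts.flatMap (fun p => p.2.map (fun k => (k, p.1)))).find? (fun kt => pred kt.1)).map Prod.snd
        = (ts.find? (fun q => q.2.any pred)).map (fun q => q.1) := by
  intro ts
  induction ts with
  | nil => rfl
  | cons p ts ih =>
    simp only [List.flatMap_cons, List.find?_append]
    by_cases hm : p.2.any pred = true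
    · rw [List.find?_cons_of_pos (by simpa using hm)]
      have hs : (p.2.find? pred).isSome := List.find?_isSome.mpr (by simpa [List.any_eq_true] using hm)
      obtain ⟨k, hk⟩ := Option.isSome_iff_exists.mp hs
      have hmap : (p.2.map (fun k => (k, p.1))).find? (fun kt => pred kt.1) = some (k, p.1) := by
        rw [List.find?_map]
        simp only [Function.comp_def]
        rw [hk]; rfl
      simp [hmap]
    · rw [List.find?_cons_of_neg (by simpa using hm)]
      have hall : ∀ x ∈ p.2, pred x = false := by
        simpa [List.any_eq_true] using hm
      have hnone : (p.2.map (fun k => (k, p.1))).find? (fun kt => pred kt.1) = none := by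
        rw [List.find?_map]
        simp only [Function.comp_def]
        rw [List.find?_eq_none.mpr (fun x hx => by simp [hall x hx])]
        rfl
      rw [hnone]
      simpa using ih

-- the flat table IS the theme table flattened, so pvFlat is the first matching theme
theorem pv_flat_eq (f : String) :
    pvFlat f = (pvThemesL.find? (fun q => pvMk q.2 f)).map (fun q => q.1) := by
  have h : pvKwTheme = pvThemesL.flatMap (fun p => p.2.map (fun k => (k, p.1))) := rfl
  unfold pvFlat
  rw [h]
  exact pv_find_flatMap (fun k => PySem.Str.isIn k (PySem.Str.lower f)) pvThemesL

-- any = not-isEmpty-of-filter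
theorem pv_any_filter {α : Type} (p : α → Bool) : ∀ l : List α, l.any p = !(l.filter p).isEmpty := by
  intro l
  induction l with
  | nil => rfl
  | cons x xs ih =>
    by_cases h : p x
    · simp [h]
    · simp [h, ih]

-- grouping the tagged pairs of one theme = filtering the classified facts
theorem pv_group_snd (g : String → Option String) (t : String) :
    ∀ (fs : List String),
      ((fs.filterMap (fun f => (g f).map (fun th => (th, f)))).filter (fun p => p.1 == t)).map Prod.snd
        = fs.filter (fun f => g f == some t) := by
  intro fs
  induction fs with
  | nil => rfl
  | cons f fs ih =>
    simp only [List.filterMap_cons, List.filter_cons]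
    cases hg : g f with
    | none => simpa [hg] using ih
    | some th =>
      by_cases ht : th = t
      · subst ht; simp [ih]
      · simp [ht, ih]

-- picking the named groups in theme order = filtering the per-theme map
theorem pv_order_map (m : String → List String) :
    ∀ (ts : List (String × List String)),
      ((ts.map Prod.fst).filter (fun t => !(m t).isEmpty)).map (fun t => (t, m t))
        = (ts.map (fun p => (p.1, m p.1))).filter (fun kv => !kv.2.isEmpty) := by
  intro ts
  induction ts with
  | nil => rfl
  | cons p ts ih =>
    simp only [List.map_cons, List.filter_cons]
    by_cases h : (m p.1).isEmpty
    · simp [h, ih]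
    · simp [h, ih]

-- the two theme tables agree; the theme names are pairwise distinct
theorem pv_themes_eq : pvThemesA.items = pvThemesL := rfl
theorem pv_order_eq : pvThemeOrder = pvThemesL.map Prod.fst := rfl
theorem pv_themes_nodup : (pvThemesL.map Prod.fst).Nodup := by decide

-- ===== VERDICT (by name: the statement is the Claim_ definition above) =====
theorem group_themes_spec : Claim_equal_group_themes := by
  intro facts _
  unfold Spec_group_themes
  simp only [group_themes, group_themes_alt]
  rw [pv_themes_eq]
  rw [pv_outer facts pvThemesL PySem.Set.empty PySem.Dict.empty
      (by intro p _; rfl) pv_themes_nodup]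
  rw [pv_canonA_common facts pvThemesL PySem.Set.empty]
  have hall : ((PySem.List.dedup facts).filter (fun f => !decide (f ∈ (PySem.Set.empty : PySem.Set String)))) = PySem.List.dedup facts := by
    simp [PySem.Set.empty]
  rw [hall, pv_common_first pvThemesL (PySem.List.dedup facts) pv_themes_nodup]
  rw [pv_b_fold facts PySem.Set.empty [], pv_tag_filter facts PySem.Set.empty, hall]
  have h2 : ∀ t : String,
      (((PySem.List.dedup facts).filterMap (fun f => (pvFlat f).map (fun th => (th, f)))).filter
          (fun p => p.1 == t)).map (fun p => p.2)
        = (PySem.List.dedup facts).filter (fun f => pvFlat f == some t) :=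
    fun t => pv_group_snd pvFlat t (PySem.List.dedup facts)
  have h1 : ∀ t : String,
      ((PySem.List.dedup facts).filterMap (fun f => (pvFlat f).map (fun th => (th, f)))).any
          (fun p => p.1 == t)
        = !((PySem.List.dedup facts).filter (fun f => pvFlat f == some t)).isEmpty := by
    intro t
    rw [pv_any_filter, ← h2 t, List.isEmpty_map]
  simp only [List.nil_append, h1, h2]
  rw [pv_order_eq,
      pv_order_map (fun t => (PySem.List.dedup facts).filter (fun f => pvFlat f == some t)) pvThemesL]
  simp only [pv_flat_eq]
  rfl
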